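-- pv_equiv track=rewrite | github.com/yavor-gornalov/softuni_programming_fundamentals | python_fundamentals/08_lists_basics_exercise/05_faro_shuffle_ver2.py | faro_shuffle
-- ===== SOURCE A (Python) =====
-- def faro_shuffle(seq, shuttles):
--     middle_idx = len(seq) // 2
--
--     result = seq
--     for i in range(shuttles):
--         first_half, second_half = result[:middle_idx], result[middle_idx:]
--
--         current_shuttle_result = []
--         while first_half or second_half:
--             current_shuttle_result.extend([first_half.pop(0), second_half.pop(0)])
--
--         result = current_shuttle_result
--
--     return result
-- ===== SOURCE B (Python) =====
-- def faro_shuffle(seq, shuttles):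
--     if shuttles <= 0:
--         return seq
--     n = len(seq)
--     m = n // 2
--     states = [list(seq)]
--     cur = list(seq)
--     for _ in range(shuttles):
--         cur = [cur[j // 2] if j % 2 == 0 else cur[m + j // 2] for j in range(n)]
--         if cur == states[0]:
--             return states[shuttles % len(states)]
--         states.append(cur)
--     return cur
-- ===== Notes on version B (the rewrite author's own statement) =====
-- stated objective: faster
-- what changed: Each shuffle is built in one pass by an index formula (result[2k]=old[k], result[2k+1]=old[m+k]) instead of repeated O(n) pop(0) calls, and the loop detects when the list returns to its initial state so the remaining shuttles are reduced modulo that period.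
import Mathlib
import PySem

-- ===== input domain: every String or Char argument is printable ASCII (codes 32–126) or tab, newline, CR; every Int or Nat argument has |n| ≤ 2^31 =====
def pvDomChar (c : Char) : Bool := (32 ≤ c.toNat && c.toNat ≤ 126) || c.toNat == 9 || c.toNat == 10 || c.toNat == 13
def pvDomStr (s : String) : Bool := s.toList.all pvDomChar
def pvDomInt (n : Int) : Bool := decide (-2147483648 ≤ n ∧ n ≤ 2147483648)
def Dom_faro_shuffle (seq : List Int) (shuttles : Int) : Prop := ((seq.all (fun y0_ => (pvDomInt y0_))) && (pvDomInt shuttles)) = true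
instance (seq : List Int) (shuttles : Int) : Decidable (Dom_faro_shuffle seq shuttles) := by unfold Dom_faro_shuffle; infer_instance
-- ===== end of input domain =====

-- B replaces the per-shuffle pop(0) interleave by a one-pass index formula and cuts the
-- shuttle loop short once the list returns to its initial state (period reduction);
-- equivalence of RETURN values is proved on Pre_ (A raises IndexError on odd-length seq with shuttles ≥ 1).

-- ===== PORT A =====
-- inner 'while first_half or second_half: …extend([first_half.pop(0), second_half.pop(0)])'
def faroWhile : List Int → List Int → List Int → List Int
  | [], [], acc => acc
  | a :: fh, b :: sh, acc => faroWhile fh sh (acc ++ [a, b])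
  | _, _, acc => acc  -- Python raises IndexError here (one half exhausted first); excluded by Pre_
termination_by fh _ _ => fh.length

def faro_shuffle (seq : List Int) (shuttles : Int) : List Int :=
  let middle : Int := PySem.Int.floordiv (seq.length : Int) 2
  (PySem.List.pyRange 0 shuttles 1).foldl
    (fun result _ =>
      faroWhile (PySem.List.slice result none (some middle))
                (PySem.List.slice result (some middle) none) [])
    seq

-- ===== PORT B =====
-- one shuffle: [cur[j//2] if j%2==0 else cur[m+j//2] for j in range(n)]
-- (both indices are nonnegative and < len(cur) for every j in range(n) when len(cur)=n, so getD is exact)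
def bStep (m n : Nat) (cur : List Int) : List Int :=
  (List.range n).map (fun j => if j % 2 = 0 then cur.getD (j / 2) 0 else cur.getD (m + j / 2) 0)

-- the 'for _ in range(shuttles)' loop with early exit when cur == states[0] (= seq)
def bLoop (m n sh : Nat) (first : List Int) : List (List Int) → List Int → Nat → List Int
  | _, cur, 0 => cur
  | states, cur, k + 1 =>
    let nxt := bStep m n cur
    if nxt = first then states.getD (sh % states.length) []
    else bLoop m n sh first (states ++ [nxt]) nxt k

def faro_shuffle_alt (seq : List Int) (shuttles : Int) : List Int :=
  if shuttles ≤ 0 then seq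
  else bLoop (seq.length / 2) seq.length shuttles.toNat seq [seq] seq shuttles.toNat

-- ===== PRECONDITION & SPEC =====
-- Pre_ excludes exactly the inputs where A raises IndexError: odd-length seq with shuttles ≥ 1
-- (the halves have unequal lengths, so first_half.pop(0) runs on an empty list).
def Pre_faro_shuffle (seq : List Int) (shuttles : Int) : Prop :=
  shuttles ≤ 0 ∨ seq.length % 2 = 0
instance (seq : List Int) (shuttles : Int) : Decidable (Pre_faro_shuffle seq shuttles) := by
  unfold Pre_faro_shuffle; infer_instance

def pvWitness_faro_shuffle : List Int × Int := ([1, 2, 3, 4, 5, 6], 3)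

def Spec_faro_shuffle (seq : List Int) (shuttles : Int) (out : List Int) : Prop := out = faro_shuffle_alt seq shuttles
instance (seq : List Int) (shuttles : Int) (out : List Int) : Decidable (Spec_faro_shuffle seq shuttles out) := by unfold Spec_faro_shuffle; infer_instance

-- ===== CLAIM (what is proved, stated in full; the proofs are below) =====
def Claim_equal_faro_shuffle : Prop := ∀ (seq : List Int) (shuttles : Int), Dom_faro_shuffle seq shuttles → Pre_faro_shuffle seq shuttles → Spec_faro_shuffle seq shuttles (faro_shuffle seq shuttles)

-- ===== LEMMAS AND PROOFS =====

-- folding a function that ignores the loop variable is iteration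
theorem foldl_ignore {α β : Type} (lst : List β) (g : α → α) (init : α) :
    lst.foldl (fun r _ => g r) init = g^[lst.length] init := by
  induction lst generalizing init with
  | nil => rfl
  | cons x xs ih => simp [List.foldl_cons, ih, Function.iterate_succ_apply]

-- periodicity: once f^[p] x = x, exponents reduce mod p
theorem iterate_period {α : Type} (f : α → α) (x : α) (p : Nat) (hp : 0 < p)
    (hx : f^[p] x = x) : ∀ a, f^[a] x = f^[a % p] x := by
  intro a
  induction a using Nat.strong_induction_on with
  | _ a ih =>
    by_cases h : a < p
    · rw [Nat.mod_eq_of_lt h]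
    · have hle : p ≤ a := le_of_not_gt h
      have h1 : a = (a - p) + p := by omega
      have h2 : f^[a] x = f^[a - p] x := by
        conv_lhs => rw [h1]
        rw [Function.iterate_add_apply, hx]
      rw [h2, ih (a - p) (by omega), ← Nat.mod_eq_sub_mod hle]

theorem faroWhile_acc (fh : List Int) : ∀ (sh acc : List Int),
    faroWhile fh sh acc = acc ++ faroWhile fh sh [] := by
  induction fh with
  | nil => intro sh acc; cases sh <;> simp [faroWhile]
  | cons a fh ih =>
    intro sh acc
    cases sh with
    | nil => simp [faroWhile]
    | cons b sh =>
      rw [faroWhile, faroWhile, ih sh (acc ++ [a, b]), ih sh ([] ++ [a, b])]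
      simp

-- the interleave of two equal-length halves as an indexed map
theorem faroWhile_eq_map (fh : List Int) : ∀ (sh : List Int), fh.length = sh.length →
    faroWhile fh sh [] = (List.range (fh.length + sh.length)).map
      (fun j => if j % 2 = 0 then fh.getD (j / 2) 0 else sh.getD (j / 2) 0) := by
  induction fh with
  | nil =>
    intro sh h
    cases sh with
    | nil => simp [faroWhile]
    | cons b sh => simp at h
  | cons a fh ih =>
    intro sh h
    cases sh with
    | nil => simp at h
    | cons b sh =>
      simp only [List.length_cons] at h
      have h' : fh.length = sh.length := by omega
      have hlen : (a :: fh).length + (b :: sh).length = (fh.length + sh.length) + 1 + 1 := by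
        simp; omega
      rw [faroWhile, faroWhile_acc, hlen, List.range_succ_eq_map, List.range_succ_eq_map]
      rw [ih sh h']
      simp only [List.map_cons, List.map_map, List.nil_append]
      have hf : ∀ j : Nat,
          ((fun j => if j % 2 = 0 then (a :: fh).getD (j / 2) 0 else (b :: sh).getD (j / 2) 0) ∘
            (fun i => i + 1) ∘ (fun i => i + 1)) j
          = (fun j => if j % 2 = 0 then fh.getD (j / 2) 0 else sh.getD (j / 2) 0) j := by
        intro j
        simp only [Function.comp_apply]
        have h2 : (j + 1 + 1) % 2 = j % 2 := by omega
        have h3 : (j + 1 + 1) / 2 = j / 2 + 1 := by omega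
        rw [h2, h3]
        by_cases hp : j % 2 = 0 <;> simp [hp]
      rw [funext hf]
      simp

-- one A-shuffle on a length-2m list equals one B-step
theorem aStep_eq_bStep (m : Nat) (l : List Int) (hl : l.length = 2 * m) :
    faroWhile (l.take m) (l.drop m) [] = bStep m (2 * m) l := by
  have hts : (l.take m).length = m := by simp [hl]; omega
  have hds : (l.drop m).length = m := by simp [hl]; omega
  rw [faroWhile_eq_map (l.take m) (l.drop m) (by rw [hts, hds]), hts, hds, bStep]
  have h2m : m + m = 2 * m := by omega
  rw [h2m]
  apply List.map_congr_left
  intro j hj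
  rw [List.mem_range] at hj
  by_cases hp : j % 2 = 0
  · have hj2 : j / 2 < m := by omega
    simp only [hp, if_pos]
    simp [List.getD_eq_getElem?_getD, List.getElem?_take_of_lt hj2]
  · have hj2 : j / 2 < m := by omega
    simp only [hp, if_false]
    simp [List.getD_eq_getElem?_getD, List.getElem?_drop]

theorem bStep_length (m n : Nat) (l : List Int) : (bStep m n l).length = n := by
  simp [bStep]

theorem bLoop_eq (m n sh : Nat) (seq : List Int) :
    ∀ k i, i + k = sh →
      bLoop m n sh seq ((List.range (i + 1)).map (fun t => (bStep m n)^[t] seq))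
        ((bStep m n)^[i] seq) k = (bStep m n)^[sh] seq := by
  intro k
  induction k with
  | zero =>
    intro i hi
    rw [bLoop]
    have h0 : i = sh := by omega
    rw [h0]
  | succ k ih =>
    intro i hi
    rw [bLoop]
    by_cases hx : bStep m n ((bStep m n)^[i] seq) = seq
    · rw [if_pos hx]
      have hx' : (bStep m n)^[i + 1] seq = seq := by
        rw [Function.iterate_succ_apply', hx]
      have hlen : ((List.range (i + 1)).map (fun t => (bStep m n)^[t] seq)).length = i + 1 := by
        simp
      have hmod : sh % (i + 1) < i + 1 := Nat.mod_lt _ (by omega)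
      rw [hlen, List.getD_eq_getElem _ _ (by simp [hmod]), List.getElem_map]
      simp only [List.getElem_range]
      exact (iterate_period (bStep m n) seq (i + 1) (by omega) hx' sh).symm
    · rw [if_neg hx]
      have hst : (List.range (i + 1)).map (fun t => (bStep m n)^[t] seq) ++
          [bStep m n ((bStep m n)^[i] seq)] =
          (List.range (i + 1 + 1)).map (fun t => (bStep m n)^[t] seq) := by
        conv_rhs => rw [List.range_succ, List.map_append]
        congr 1
        simp only [List.map_cons, List.map_nil]
        rw [Function.iterate_succ_apply']
      rw [hst]
      have := ih (i + 1) (by omega)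
      rw [Function.iterate_succ_apply'] at this
      exact this

theorem bStep_iter_length (m n : Nat) (seq : List Int) (t : Nat) (h : seq.length = n) :
    ((bStep m n)^[t] seq).length = n := by
  induction t with
  | zero => simpa using h
  | succ t ih => rw [Function.iterate_succ_apply', bStep_length]

theorem iter_eq (m : Nat) (seq : List Int) (hl : seq.length = 2 * m) (t : Nat) :
    (fun l => faroWhile (l.take m) (l.drop m) ([] : List Int))^[t] seq
      = (bStep m (2 * m))^[t] seq := by
  induction t with
  | zero => rfl
  | succ t ih =>
    rw [Function.iterate_succ_apply', Function.iterate_succ_apply', ih]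
    exact aStep_eq_bStep m _ (bStep_iter_length m (2 * m) seq t hl)

-- ===== VERDICT (by name: the statement is the Claim_ definition above) =====
theorem faro_shuffle_spec : Claim_equal_faro_shuffle := by
  intro seq shuttles _ hpre
  simp only [Spec_faro_shuffle]
  by_cases hs : shuttles ≤ 0
  · simp only [faro_shuffle, faro_shuffle_alt, if_pos hs,
      PySem.List.pyRange_one_eq_nil hs, List.foldl_nil]
  · have hpos : 0 < shuttles := by omega
    have heven : seq.length % 2 = 0 := by
      rcases hpre with h | h
      · omega
      · exact h
    obtain ⟨m, hm⟩ : ∃ m, seq.length = 2 * m := ⟨seq.length / 2, by omega⟩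
    simp only [faro_shuffle, faro_shuffle_alt, if_neg hs]
    rw [hm]
    have hmid : PySem.Int.floordiv ((2 * m : Nat) : Int) 2 = ((m : Nat) : Int) := by
      rw [PySem.Int.floordiv_eq_ediv_of_pos (by norm_num)]
      omega
    simp only [hmid, PySem.List.slice_to_natCast, PySem.List.slice_from_natCast]
    rw [foldl_ignore, PySem.List.length_pyRange_one]
    have hsub : (shuttles - 0).toNat = shuttles.toNat := by omega
    rw [hsub, iter_eq m seq hm shuttles.toNat]
    have hdiv : 2 * m / 2 = m := by omega
    rw [hdiv]
    have hB := bLoop_eq m (2 * m) shuttles.toNat seq shuttles.toNat 0 (by omega)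
    simp only [Function.iterate_zero_apply] at hB
    exact hB.symm
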